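-- pv_equiv track=rewrite | github.com/rakesh-050791/DS-Algo | Intermediate/August-2022/1-Aug-2022.py | solve
-- ===== SOURCE A (Python) =====
-- def solve(A):
--     result = 0
--     currentBit = 1
--
--     while (A > 0):
--         currentBit *= 5
--         if (A & 1 == 1):
--             result += currentBit
--         # A //= 2
--         A = A >> 1
--     return result
-- ===== SOURCE B (Python) =====
-- def solve(A):
--     # Closed form: reading A's binary digits as a base-5 numeral gives
--     # sum(bit_i * 5**i); the loop adds 5**(i+1) per set bit, i.e. 5x that.
--     if A <= 0:
--         return 0
--     return 5 * int(bin(A)[2:], 5)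
-- ===== Notes on version B (the rewrite author's own statement) =====
-- stated objective: alternative
-- what changed: Replaces the shift-and-accumulate loop by a closed form: reinterpret A's binary digit string as a base-5 numeral and multiply by 5 (5 * int(bin(A)[2:], 5)).
import Mathlib
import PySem

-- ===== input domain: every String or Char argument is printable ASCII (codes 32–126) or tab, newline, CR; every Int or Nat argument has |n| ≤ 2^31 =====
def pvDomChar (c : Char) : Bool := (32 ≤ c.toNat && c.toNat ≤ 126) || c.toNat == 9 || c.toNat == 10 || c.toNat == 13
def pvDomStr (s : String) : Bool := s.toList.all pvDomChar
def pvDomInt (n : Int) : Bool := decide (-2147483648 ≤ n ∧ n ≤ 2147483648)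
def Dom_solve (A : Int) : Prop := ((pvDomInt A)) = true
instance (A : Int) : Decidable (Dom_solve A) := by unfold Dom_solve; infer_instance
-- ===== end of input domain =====

-- B replaces A's shift-and-accumulate loop with a closed form: 5 * (A's binary digits read as a base-5 numeral).


-- ===== PORT A =====
-- the while loop; A & 1 is ported as A % 2 and A >> 1 as floor division by 2
-- (exact: the loop body only runs when A > 0)
def solveGo (A result currentBit : Int) : Int :=
  if h : A > 0 then
    let cb := currentBit * 5
    let result' := if A % 2 = 1 then result + cb else result
    solveGo (PySem.Int.floordiv A 2) result' cb
  else result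
termination_by A.toNat
decreasing_by
  rw [PySem.Int.floordiv_eq_ediv_of_pos (by omega)]
  omega

def solve (A : Int) : Int := solveGo A 0 1

-- ===== PORT B =====
-- bin(A)[2:] for A > 0 (so A.toNat) as a list of '0'/'1' chars
def toBinChars (n : Nat) : List Char :=
  if n = 0 then []
  else toBinChars (n / 2) ++ [if n % 2 = 1 then '1' else '0']

-- int(s, 5) on a string of binary digits
def fromBase5 (cs : List Char) : Int :=
  cs.foldl (fun acc c => acc * 5 + (if c = '1' then 1 else 0)) 0

def solve_alt (A : Int) : Int :=
  if A ≤ 0 then 0 else 5 * fromBase5 (toBinChars A.toNat)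

-- ===== PRECONDITION & SPEC =====
def Spec_solve (A : Int) (out : Int) : Prop := out = solve_alt A
instance (A : Int) (out : Int) : Decidable (Spec_solve A out) := by unfold Spec_solve; infer_instance

-- ===== CLAIM (what is proved, stated in full; the proofs are below) =====
def Claim_equal_solve : Prop := ∀ (A : Int), Dom_solve A → Spec_solve A (solve A)

-- ===== LEMMAS AND PROOFS =====

lemma fromBase5_append (cs : List Char) (c : Char) :
    fromBase5 (cs ++ [c]) = fromBase5 cs * 5 + (if c = '1' then 1 else 0) := by
  simp [fromBase5]

lemma fromBase5_bin (n : Nat) (hn : n ≠ 0) :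
    fromBase5 (toBinChars n) = fromBase5 (toBinChars (n / 2)) * 5 + (n % 2 : Int) := by
  rw [toBinChars]
  simp only [hn, ite_false]
  rw [fromBase5_append]
  congr 1
  rcases Nat.mod_two_eq_zero_or_one n with h | h <;> simp [h] <;> omega

lemma solveGo_eq (n : Nat) : ∀ (A result cb : Int), A.toNat = n →
    solveGo A result cb = result + cb * 5 * fromBase5 (toBinChars A.toNat) := by
  induction n using Nat.strong_induction_on with
  | _ n ih =>
    intro A result cb hA
    rw [solveGo]
    by_cases h : A > 0
    · simp only [h, dif_pos]
      have hfd : PySem.Int.floordiv A 2 = A / 2 :=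
        PySem.Int.floordiv_eq_ediv_of_pos (by omega)
      have hlt : (A / 2).toNat < n := by omega
      have hrec := ih _ hlt (PySem.Int.floordiv A 2)
        (if A % 2 = 1 then result + cb * 5 else result) (cb * 5) (by rw [hfd])
      rw [hrec, hfd]
      have hn0 : A.toNat ≠ 0 := by omega
      rw [fromBase5_bin _ hn0]
      have h2 : (A / 2).toNat = A.toNat / 2 := by omega
      have hm : (A.toNat % 2 : Int) = A % 2 := by omega
      rw [h2, hm]
      rcases Int.emod_two_eq_zero_or_one A with hp | hp <;> simp [hp] <;> ring
    · simp only [h, dif_neg, not_false_iff]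
      have : A.toNat = 0 := by omega
      rw [this, toBinChars]
      simp [fromBase5]

-- ===== VERDICT (by name: the statement is the Claim_ definition above) =====
theorem solve_spec : Claim_equal_solve := by
  intro A _
  unfold Spec_solve solve solve_alt
  rw [solveGo_eq A.toNat A 0 1 rfl]
  by_cases h : A ≤ 0
  · have : A.toNat = 0 := by omega
    simp [h, this, toBinChars, fromBase5]
  · simp only [h, if_neg, ite_false, zero_add]
    ring
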